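-- pv_equiv track=rewrite | github.com/VLevski/Programming0-1 | week3/4-Problems-Construction/lyulin_city.py | visable_blocks
-- ===== SOURCE A (Python) =====
-- def visable_blocks(blocks):
--     visable_blocks = [0]
--     limit = blocks[0]
--     index = 0
--
--     for block in blocks:
--         if block > limit:
--             visable_blocks += [index]
--             limit = block
--         index += 1
--
--     return visable_blocks
-- ===== SOURCE B (Python) =====
-- def visable_blocks(blocks):
--     # Two-pass: materialize the prefix-maximum table, then select indices.
--     prefix = [blocks[0]]
--     for b in blocks[1:]:
--         prefix.append(max(b, prefix[-1]))
--     return [0] + [i for i, (b, m) in enumerate(zip(blocks[1:], prefix), 1) if b > m]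
-- ===== Notes on version B (the rewrite author's own statement) =====
-- stated objective: alternative
-- what changed: B materializes the full prefix-maximum table in a first pass and then selects indices in a separate zip/enumerate comprehension, instead of A's single loop maintaining a scalar running limit and manual index counter.
-- outside the precondition, e.g. on visable_blocks([]): A raises IndexError, B raises IndexError
import Mathlib
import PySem

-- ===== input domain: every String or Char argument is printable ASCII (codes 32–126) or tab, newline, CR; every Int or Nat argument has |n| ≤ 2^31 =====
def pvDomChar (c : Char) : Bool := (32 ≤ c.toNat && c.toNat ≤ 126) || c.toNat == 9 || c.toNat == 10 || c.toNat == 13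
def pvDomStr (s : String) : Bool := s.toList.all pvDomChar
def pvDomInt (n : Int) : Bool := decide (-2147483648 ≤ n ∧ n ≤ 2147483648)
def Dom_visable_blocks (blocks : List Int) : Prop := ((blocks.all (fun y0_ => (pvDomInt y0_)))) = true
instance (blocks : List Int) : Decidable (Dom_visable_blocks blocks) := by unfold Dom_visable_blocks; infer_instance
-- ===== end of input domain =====

-- B builds a materialized prefix-maximum table and selects indices in a second pass; same O(n) cost, different decomposition.
-- Pre_ excludes the empty list, on which both Pythons raise IndexError (blocks[0]).


-- ===== PORT A =====
-- state: (visable_blocks, limit, index)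
def visable_blocks (blocks : List Int) : List Int :=
  match PySem.List.pyGet? blocks 0 with
  | none => []   -- unreachable: Pre_ excludes the empty list (IndexError in Python)
  | some limit0 =>
    (blocks.foldl
      (fun (st : List Int × Int × Int) block =>
        let (vis, limit, index) := st
        if block > limit then (vis ++ [index], block, index + 1)
        else (vis, limit, index + 1))
      ([0], limit0, 0)).1

-- ===== PORT B =====
-- prefix-maximum table: prefix = [blocks[0]]; for b in blocks[1:]: prefix.append(max(b, prefix[-1]))
def vbScan (last : Int) : List Int → List Int
  | [] => []
  | b :: rest => max b last :: vbScan (max b last) rest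

def visable_blocks_alt (blocks : List Int) : List Int :=
  match blocks with
  | [] => []   -- unreachable: Pre_ excludes the empty list (IndexError in Python)
  | h :: t =>
    let pre := h :: vbScan h t
    0 :: ((PySem.List.enumerate (t.zip pre) 1).filterMap
      (fun p => if p.2.1 > p.2.2 then some p.1 else none))

-- ===== PRECONDITION & SPEC =====
-- Pre_ excludes exactly the empty list, where blocks[0] raises IndexError in A (and in B).
def Pre_visable_blocks (blocks : List Int) : Prop := blocks ≠ []
instance (blocks : List Int) : Decidable (Pre_visable_blocks blocks) := by unfold Pre_visable_blocks; infer_instance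
def pvWitness_visable_blocks : List Int := [1, 3, 2, 5]

def Spec_visable_blocks (blocks : List Int) (out : List Int) : Prop := out = visable_blocks_alt blocks
instance (blocks : List Int) (out : List Int) : Decidable (Spec_visable_blocks blocks out) := by unfold Spec_visable_blocks; infer_instance

-- ===== CLAIM (what is proved, stated in full; the proofs are below) =====
def Claim_equal_visable_blocks : Prop := ∀ (blocks : List Int), Dom_visable_blocks blocks → Pre_visable_blocks blocks → Spec_visable_blocks blocks (visable_blocks blocks)

-- ===== LEMMAS AND PROOFS =====

-- canonical selection: indices (from idx) of elements strictly above the running limit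
def vbSel (limit idx : Int) : List Int → List Int
  | [] => []
  | b :: rest => if b > limit then idx :: vbSel b (idx + 1) rest else vbSel limit (idx + 1) rest

theorem vbA_eq : ∀ (t vis : List Int) (limit idx : Int),
    (t.foldl
      (fun (st : List Int × Int × Int) block =>
        let (vis, limit, index) := st
        if block > limit then (vis ++ [index], block, index + 1)
        else (vis, limit, index + 1))
      (vis, limit, idx)).1 = vis ++ vbSel limit idx t := by
  intro t
  induction t with
  | nil => intro vis limit idx; simp [vbSel]
  | cons b rest ih =>
    intro vis limit idx
    simp only [List.foldl_cons, vbSel]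
    by_cases h : b > limit
    · simp [h, ih]
    · simp [h, ih]

theorem vbB_eq : ∀ (t : List Int) (limit idx : Int),
    ((PySem.List.enumerate (t.zip (limit :: vbScan limit t)) idx).filterMap
      (fun p => if p.2.1 > p.2.2 then some p.1 else none)) = vbSel limit idx t := by
  intro t
  induction t with
  | nil => intro limit idx; simp [vbScan, vbSel, PySem.List.enumerate_nil]
  | cons b rest ih =>
    intro limit idx
    simp only [vbScan, List.zip_cons_cons, PySem.List.enumerate_cons, List.filterMap_cons, vbSel]
    by_cases h : b > limit
    · have hm : max b limit = b := by omega
      simp [h, hm, ih]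
    · have hm : max b limit = limit := by omega
      simp [h, hm, ih]

-- ===== VERDICT (by name: the statement is the Claim_ definition above) =====
theorem visable_blocks_spec : Claim_equal_visable_blocks := by
  intro blocks _ hpre
  unfold Spec_visable_blocks visable_blocks visable_blocks_alt
  match blocks with
  | [] => exact absurd rfl hpre
  | h :: t =>
    have hnot : ¬ h > h := lt_irrefl h
    simp [PySem.List.pyGet?, PySem.List.pyIdx?, hnot, vbA_eq, vbB_eq]
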